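-- pv_equiv track=rewrite | github.com/aditya-mkhy/Aurix | util.py | make_title_path
-- ===== SOURCE A (Python) =====
-- def make_title_path(title: str = None) -> str:
--     if title is None:
--         raise ValueError("Title can't have \"None\" Value. It must a \"str\"")
--
--     not_include = ' <>:"/\\|?*'+"'"
--     title_path = ""
--
--     for w in title:
--         if w in not_include:
--             if title_path[-1:] != " ":
--                 title_path += " "
--         else:
--             title_path += w
--
--     return title_path
-- ===== SOURCE B (Python) =====
-- import re
--
-- _FORBIDDEN_RUN = re.compile(r'[ <>:"/\\|?*\']+')
--
-- def make_title_path(title: str = None) -> str: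
--     if title is None:
--         raise ValueError("Title can't have \"None\" Value. It must a \"str\"")
--     return _FORBIDDEN_RUN.sub(' ', title)
-- ===== Notes on version B (the rewrite author's own statement) =====
-- stated objective: idiomatic
-- what changed: The explicit per-character loop with last-character bookkeeping is replaced by a single precompiled regex substitution that maps each maximal run of forbidden characters (including space) to one space.
import Mathlib
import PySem

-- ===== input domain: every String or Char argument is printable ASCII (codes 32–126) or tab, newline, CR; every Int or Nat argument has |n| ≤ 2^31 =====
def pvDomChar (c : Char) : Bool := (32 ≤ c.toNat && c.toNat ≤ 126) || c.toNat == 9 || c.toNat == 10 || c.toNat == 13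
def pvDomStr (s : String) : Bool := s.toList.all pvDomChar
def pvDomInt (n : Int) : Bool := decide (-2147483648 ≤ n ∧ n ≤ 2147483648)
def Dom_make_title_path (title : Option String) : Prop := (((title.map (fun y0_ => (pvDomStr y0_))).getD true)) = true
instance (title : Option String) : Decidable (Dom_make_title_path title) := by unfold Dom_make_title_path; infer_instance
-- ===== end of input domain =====

-- B replaces A's character loop (with last-character bookkeeping) by a single regex
-- substitution collapsing each maximal run of forbidden characters to one space.
-- Pre_ excludes title = none, where A raises ValueError.

-- ===== PORT A =====

-- the Python constant not_include = ' <>:"/\\|?*' + "'"  (as a list of chars; exact)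
def pvNotInclude : List Char := [' ', '<', '>', ':', '"', '/', '\\', '|', '?', '*', '\'']

-- Port of A: the loop builds title_path char by char; Python string concatenation is
-- List Char append (exact on this domain); title_path[-1:] != " " is the slice [-1:]
-- of the accumulator compared with " ".
def make_title_path (title : Option String) : String :=
  match title with
  | none => ""   -- outside Pre_: Python raises ValueError here
  | some t =>
    let title_path : List Char :=
      t.toList.foldl
        (fun title_path w =>
          if w ∈ pvNotInclude then
            if PySem.List.slice title_path (some (-1)) none ≠ [' '] then
              title_path ++ [' ']
            else
              title_path
          else
            title_path ++ [w])
        []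
    String.ofList title_path

-- ===== PORT B =====

-- Port of re.sub(r'[ <>:"/\|?*\']+', ' ', title): each maximal run of characters
-- matching the class is replaced by a single ' '; exact for this pattern.
def pvBad (c : Char) : Bool := c ∈ pvNotInclude

def pvSubBadRuns : List Char → List Char
  | [] => []
  | c :: rest =>
    if pvBad c then ' ' :: pvSubBadRuns (rest.dropWhile pvBad)
    else c :: pvSubBadRuns rest
termination_by l => l.length
decreasing_by
  · have := List.length_dropWhile_le pvBad rest
    simp; omega
  · simp

def make_title_path_alt (title : Option String) : String :=
  match title with
  | none => ""   -- outside Pre_: Python raises ValueError here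
  | some t => String.ofList (pvSubBadRuns t.toList)

-- ===== PRECONDITION & SPEC =====
-- Pre_ excludes exactly title = none, where the Python A raises ValueError.
def Pre_make_title_path (title : Option String) : Prop := title ≠ none
instance (title : Option String) : Decidable (Pre_make_title_path title) := by unfold Pre_make_title_path; infer_instance
def pvWitness_make_title_path : Option String := some "a <b>:c"

def Spec_make_title_path (title : Option String) (out : String) : Prop := out = make_title_path_alt title
instance (title : Option String) (out : String) : Decidable (Spec_make_title_path title out) := by unfold Spec_make_title_path; infer_instance

-- ===== CLAIM (what is proved, stated in full; the proofs are below) =====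
def Claim_equal_make_title_path : Prop := ∀ (title : Option String), Dom_make_title_path title → Pre_make_title_path title → Spec_make_title_path title (make_title_path title)

-- ===== LEMMAS AND PROOFS =====

-- A's loop rewritten structurally, tracking whether the accumulator ends in a space.
def pvAux (b : Bool) : List Char → List Char
  | [] => []
  | c :: rest =>
    if pvBad c then
      if b then pvAux true rest else ' ' :: pvAux true rest
    else c :: pvAux false rest

-- the branch condition of A's loop, on the accumulator
def pvEndsSpace (st : List Char) : Bool :=
  ¬ PySem.List.slice st (some (-1)) none ≠ [' ']

lemma pvEndsSpace_nil : pvEndsSpace [] = false := by decide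

lemma slice_last (st : List Char) (c : Char) :
    PySem.List.slice (st ++ [c]) (some (-1)) none = [c] := by
  rw [PySem.List.slice_some_none]
  have h : PySem.List.clampIdx (st ++ [c]).length (-1) = (st ++ [c]).length - 1 := by
    simp
  rw [h]
  simp

lemma pvEndsSpace_append (st : List Char) (c : Char) :
    pvEndsSpace (st ++ [c]) = (c == ' ') := by
  unfold pvEndsSpace
  rw [slice_last]
  by_cases h : c = ' ' <;> simp [h]

-- A's fold from any accumulator = accumulator ++ pvAux (ends-in-space flag)
lemma foldA_aux (l : List Char) : ∀ (st : List Char),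
    l.foldl
      (fun title_path w =>
        if w ∈ pvNotInclude then
          if PySem.List.slice title_path (some (-1)) none ≠ [' '] then
            title_path ++ [' ']
          else
            title_path
        else
          title_path ++ [w]) st
      = st ++ pvAux (pvEndsSpace st) l := by
  induction l with
  | nil => intro st; simp [pvAux]
  | cons c rest ih =>
    intro st
    simp only [List.foldl_cons]
    by_cases hb : c ∈ pvNotInclude
    · by_cases hs : pvEndsSpace st = true
      · have hcond : ¬ PySem.List.slice st (some (-1)) none ≠ [' '] := by
          unfold pvEndsSpace at hs; simp at hs; simp [hs]
        rw [if_pos hb, if_neg (by simpa using hcond), ih st]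
        simp [pvAux, hs, pvBad, hb]
      · have hs' : pvEndsSpace st = false := by simpa using hs
        have hcond : PySem.List.slice st (some (-1)) none ≠ [' '] := by
          unfold pvEndsSpace at hs'; simpa using hs'
        rw [if_pos hb, if_pos hcond, ih (st ++ [' '])]
        have : pvEndsSpace (st ++ [' ']) = true := by
          rw [pvEndsSpace_append]; rfl
        rw [this]
        simp [pvAux, hs', pvBad, hb]
    · rw [if_neg hb, ih (st ++ [c])]
      have hc : (c == ' ') = false := by
        have : c ≠ ' ' := by intro h; exact hb (h ▸ (by decide : ' ' ∈ pvNotInclude))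
        simpa using this
      rw [pvEndsSpace_append, hc]
      simp [pvAux, pvBad, hb]

-- pvAux true skips the leading bad run
lemma pvAux_true_dropWhile (l : List Char) :
    pvAux true l = pvAux false (l.dropWhile pvBad) := by
  induction l with
  | nil => simp [pvAux]
  | cons c rest ih =>
    by_cases hb : pvBad c = true
    · simp [pvAux, hb, ih]
    · have hb' : pvBad c = false := by simpa using hb
      simp [pvAux, hb']

-- pvAux false is exactly B's run-collapsing substitution
lemma pvAux_false_eq_sub (l : List Char) : pvAux false l = pvSubBadRuns l := by
  induction hn : l.length using Nat.strong_induction_on generalizing l with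
  | _ n ih =>
    cases l with
    | nil => simp [pvAux, pvSubBadRuns]
    | cons c rest =>
      by_cases hb : pvBad c = true
      · have hlt : (rest.dropWhile pvBad).length < n := by
          have := List.length_dropWhile_le pvBad rest
          simp at hn; omega
        rw [pvSubBadRuns]
        simp only [pvAux, hb, if_pos]
        rw [pvAux_true_dropWhile, ih _ hlt _ rfl]
        simp
      · have hb' : pvBad c = false := by simpa using hb
        have hlt : rest.length < n := by simp at hn; omega
        rw [pvSubBadRuns]
        simp only [pvAux, hb']
        rw [ih _ hlt _ rfl]
        simp

-- ===== VERDICT (by name: the statement is the Claim_ definition above) =====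
theorem make_title_path_spec : Claim_equal_make_title_path := by
  intro title _ hpre
  cases title with
  | none => exact absurd rfl hpre
  | some t =>
    unfold Spec_make_title_path make_title_path make_title_path_alt
    simp only
    rw [foldA_aux, pvEndsSpace_nil, List.nil_append, pvAux_false_eq_sub]
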